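-- pv_equiv track=rewrite | github.com/tsackton/taelgar-utils | _old_stuff_/generate_session_note.py | concatenate_adjacent_speakers
-- ===== SOURCE A (Python) =====
-- def concatenate_adjacent_speakers(synchronized_transcript):
--     """
--     Concatenate adjacent dialogue from the same speaker and remove timestamps.
--
--     :param synchronized_transcript: List of transcript entries with speaker labels.
--     :return: Cleaned-up transcript with adjacent speakers concatenated.
--     """
--     final_transcript = []
--     current_speaker = None
--     current_text = []
--
--     for entry in synchronized_transcript:
--         speaker = entry['speaker']
--         text = entry['text']
--
--         if speaker == current_speaker:
--             # If the speaker is the same as the previous, concatenate the text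
--             current_text.append(text)
--         else:
--             # If we encounter a new speaker, save the current speaker's dialogue
--             if current_speaker is not None:
--                 final_transcript.append({
--                     'speaker': current_speaker,
--                     'text': ' '.join(current_text)
--                 })
--             # Start a new entry for the new speaker
--             current_speaker = speaker
--             current_text = [text]
--
--     # Add the last speaker's dialogue
--     if current_speaker is not None:
--         final_transcript.append({
--             'speaker': current_speaker,
--             'text': ' '.join(current_text)
--         })
--
--     return final_transcript
-- ===== SOURCE B (Python) =====
-- def concatenate_adjacent_speakers(synchronized_transcript):
--     """Two-pointer run scanner: find each maximal run of a speaker, emit one record per run."""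
--     st = synchronized_transcript
--     n = len(st)
--     final = []
--     i = 0
--     while i < n:
--         speaker = st[i]['speaker']
--         j = i + 1
--         while j < n and st[j]['speaker'] == speaker:
--             j += 1
--         final.append({'speaker': speaker,
--                       'text': ' '.join(st[k]['text'] for k in range(i, j))})
--         i = j
--     return final
-- ===== Notes on version B (the rewrite author's own statement) =====
-- stated objective: alternative
-- what changed: Replaces A's accumulator-with-sentinel-and-final-flush single pass by a two-pointer scan that extracts each maximal same-speaker run and emits one merged record per run, with no current_speaker state or end-of-loop flush.
import Mathlib
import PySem

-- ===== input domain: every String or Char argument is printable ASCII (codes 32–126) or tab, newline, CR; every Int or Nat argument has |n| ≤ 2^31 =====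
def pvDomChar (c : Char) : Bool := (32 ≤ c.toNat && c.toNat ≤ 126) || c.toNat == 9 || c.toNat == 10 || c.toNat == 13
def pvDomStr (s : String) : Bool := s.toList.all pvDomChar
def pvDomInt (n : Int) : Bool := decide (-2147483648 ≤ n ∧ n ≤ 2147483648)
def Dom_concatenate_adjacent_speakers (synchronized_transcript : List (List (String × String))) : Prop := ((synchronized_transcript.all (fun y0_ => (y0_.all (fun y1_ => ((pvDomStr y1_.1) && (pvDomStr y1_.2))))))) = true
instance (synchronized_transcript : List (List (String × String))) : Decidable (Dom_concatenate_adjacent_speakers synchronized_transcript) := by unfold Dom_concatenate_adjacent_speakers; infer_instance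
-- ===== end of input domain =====

-- B replaces A's current-speaker accumulator and end-of-loop flush by a two-pointer scan
-- over maximal same-speaker runs (objective: alternative decomposition, same cost).

-- first-match association-list lookup = Python dict access d[k] (none = KeyError, excluded by Pre_)
def pvKey (e : List (String × String)) (k : String) : Option String :=
  (e.find? (fun p => p.1 == k)).map (·.2)

-- total access used by both ports; Pre_ guarantees the default is never taken
def pvKeyD (e : List (String × String)) (k : String) : String :=
  (pvKey e k).getD ""

-- ===== PORT A =====
-- A's loop state: (final_transcript, current_speaker : Option, current_text)
def pvStepA (acc : List (List (String × String)) × Option String × List String)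
    (entry : List (String × String)) :
    List (List (String × String)) × Option String × List String :=
  let speaker := pvKeyD entry "speaker"
  let text := pvKeyD entry "text"
  if some speaker == acc.2.1 then
    (acc.1, acc.2.1, acc.2.2 ++ [text])
  else
    match acc.2.1 with
    | some cs =>
        (acc.1 ++ [[("speaker", cs), ("text", PySem.Str.join " " acc.2.2)]], some speaker, [text])
    | none => (acc.1, some speaker, [text])

def concatenate_adjacent_speakers (synchronized_transcript : List (List (String × String))) : List (List (String × String)) :=
  let fin := synchronized_transcript.foldl pvStepA ([], none, [])
  match fin.2.1 with
  | some cs => fin.1 ++ [[("speaker", cs), ("text", PySem.Str.join " " fin.2.2)]]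
  | none => fin.1

-- ===== PORT B =====
-- B's outer while loop: take the maximal run of the head speaker, emit one record, recurse on the rest
def pvRuns : List (List (String × String)) → List (List (String × String))
  | [] => []
  | e :: rest =>
    let speaker := pvKeyD e "speaker"
    let run := rest.takeWhile (fun x => pvKeyD x "speaker" == speaker)
    let rest' := rest.dropWhile (fun x => pvKeyD x "speaker" == speaker)
    [("speaker", speaker),
     ("text", PySem.Str.join " " ((e :: run).map (fun x => pvKeyD x "text")))] :: pvRuns rest'
termination_by l => l.length
decreasing_by
  simp only [List.length_cons]
  exact Nat.lt_succ_of_le (List.length_dropWhile_le _ _)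

def concatenate_adjacent_speakers_alt (synchronized_transcript : List (List (String × String))) : List (List (String × String)) :=
  pvRuns synchronized_transcript

-- ===== PRECONDITION & SPEC =====
-- Pre_ excludes exactly the inputs on which the Python A raises KeyError: an entry missing
-- the 'speaker' or 'text' key.
def Pre_concatenate_adjacent_speakers (synchronized_transcript : List (List (String × String))) : Prop :=
  ∀ e ∈ synchronized_transcript, (pvKey e "speaker").isSome = true ∧ (pvKey e "text").isSome = true
instance (synchronized_transcript : List (List (String × String))) : Decidable (Pre_concatenate_adjacent_speakers synchronized_transcript) := by unfold Pre_concatenate_adjacent_speakers; infer_instance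

def pvWitness_concatenate_adjacent_speakers : (List (List (String × String))) :=
  [[("speaker", "alice"), ("text", "hi")], [("speaker", "alice"), ("text", "there")], [("speaker", "bob"), ("text", "hey")]]

def Spec_concatenate_adjacent_speakers (synchronized_transcript : List (List (String × String))) (out : List (List (String × String))) : Prop := out = concatenate_adjacent_speakers_alt synchronized_transcript
instance (synchronized_transcript : List (List (String × String))) (out : List (List (String × String))) : Decidable (Spec_concatenate_adjacent_speakers synchronized_transcript out) := by unfold Spec_concatenate_adjacent_speakers; infer_instance

-- ===== CLAIM (what is proved, stated in full; the proofs are below) =====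
def Claim_equal_concatenate_adjacent_speakers : Prop := ∀ (synchronized_transcript : List (List (String × String))), Dom_concatenate_adjacent_speakers synchronized_transcript → Pre_concatenate_adjacent_speakers synchronized_transcript → Spec_concatenate_adjacent_speakers synchronized_transcript (concatenate_adjacent_speakers synchronized_transcript)

-- ===== LEMMAS AND PROOFS =====

-- proof-only: the record A/B emit for a finished speaker
def pvMk (cs : String) (ts : List String) : List (String × String) :=
  [("speaker", cs), ("text", PySem.Str.join " " ts)]

-- proof-only: what A computes from the state (some cs, ts) onward, flush included
def pvMerge (cs : String) (ts : List String) : List (List (String × String)) → List (List (String × String))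
  | [] => [pvMk cs ts]
  | e :: rest =>
    if pvKeyD e "speaker" == cs then pvMerge cs (ts ++ [pvKeyD e "text"]) rest
    else pvMk cs ts :: pvMerge (pvKeyD e "speaker") [pvKeyD e "text"] rest

lemma foldA_merge (l : List (List (String × String))) :
    ∀ (fin : List (List (String × String))) (cs : String) (ts : List String),
    (match (l.foldl pvStepA (fin, some cs, ts)) with
     | (f, some c, t) => f ++ [pvMk c t]
     | (f, none, _) => f) = fin ++ pvMerge cs ts l := by
  induction l with
  | nil => intro fin cs ts; simp [pvMerge, pvMk]
  | cons e rest ih =>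
    intro fin cs ts
    simp only [List.foldl_cons, pvStepA, pvMerge]
    by_cases h : pvKeyD e "speaker" = cs
    · rw [if_pos (by simp [h]), if_pos (by simp [h])]
      exact ih fin cs (ts ++ [pvKeyD e "text"])
    · rw [if_neg (by simp [h]), if_neg (by simp [h])]
      have := ih (fin ++ [pvMk cs ts]) (pvKeyD e "speaker") [pvKeyD e "text"]
      simp only [pvMk] at this ⊢
      rw [this]
      simp

lemma merge_runs (l : List (List (String × String))) :
    ∀ (cs : String) (ts : List String),
    pvMerge cs ts l =
      pvMk cs (ts ++ (l.takeWhile (fun x => pvKeyD x "speaker" == cs)).map (fun x => pvKeyD x "text"))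
        :: pvRuns (l.dropWhile (fun x => pvKeyD x "speaker" == cs)) := by
  induction l with
  | nil => intro cs ts; simp [pvMerge, pvRuns]
  | cons e rest ih =>
    intro cs ts
    simp only [pvMerge, List.takeWhile_cons, List.dropWhile_cons]
    by_cases h : pvKeyD e "speaker" = cs
    · rw [if_pos (by simp [h])]
      simp only [h, beq_self_eq_true, if_true]
      rw [ih cs (ts ++ [pvKeyD e "text"])]
      simp
    · rw [if_neg (by simp [h])]
      simp only [show (pvKeyD e "speaker" == cs) = false by simp [h], Bool.false_eq_true,
        if_false, List.map_nil, List.append_nil]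
      rw [ih (pvKeyD e "speaker") [pvKeyD e "text"], pvRuns]
      simp [pvMk]

-- ===== VERDICT (by name: the statement is the Claim_ definition above) =====
theorem concatenate_adjacent_speakers_spec : Claim_equal_concatenate_adjacent_speakers := by
  intro st _ _
  unfold Spec_concatenate_adjacent_speakers concatenate_adjacent_speakers concatenate_adjacent_speakers_alt
  cases st with
  | nil => simp [pvRuns]
  | cons e rest =>
    simp only [List.foldl_cons, pvStepA]
    rw [if_neg (by simp)]
    have hA := foldA_merge rest [] (pvKeyD e "speaker") [pvKeyD e "text"]
    rw [merge_runs rest (pvKeyD e "speaker") [pvKeyD e "text"]] at hA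
    simp only [List.nil_append, pvMk, List.singleton_append] at hA
    rw [pvRuns]
    rcases hf : List.foldl pvStepA ([], some (pvKeyD e "speaker"), [pvKeyD e "text"]) rest with ⟨f, c, t⟩
    rw [hf] at hA
    cases c <;> simpa using hA
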